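-- pv_equiv track=rewrite | github.com/Amir08gh/AmirGh08 | AmirGh08.py | compare_terms
-- ===== SOURCE A (Python) =====
-- def compare_terms(term1, term2):
--     diff_count = 0
--     result = ''
--     for a, b in zip(term1, term2):
--         if a != b:
--             result += '-'
--             diff_count += 1
--         else:
--             result += a
--     return result if diff_count == 1 else None
-- ===== SOURCE B (Python) =====
-- def compare_terms(term1, term2):
--     pairs = list(zip(term1, term2))
--     diffs = [i for i, (a, b) in enumerate(pairs) if a != b]
--     if len(diffs) != 1:
--         return None
--     idx = diffs[0]
--     return ''.join('-' if i == idx else a for i, (a, b) in enumerate(pairs))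
-- ===== Notes on version B (the rewrite author's own statement) =====
-- stated objective: alternative
-- what changed: B separates locating the differing positions (one enumerate/filter pass producing the index list) from building the masked string (a second positional pass), instead of A's single fused loop accumulating a count and a growing string.
import Mathlib
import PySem

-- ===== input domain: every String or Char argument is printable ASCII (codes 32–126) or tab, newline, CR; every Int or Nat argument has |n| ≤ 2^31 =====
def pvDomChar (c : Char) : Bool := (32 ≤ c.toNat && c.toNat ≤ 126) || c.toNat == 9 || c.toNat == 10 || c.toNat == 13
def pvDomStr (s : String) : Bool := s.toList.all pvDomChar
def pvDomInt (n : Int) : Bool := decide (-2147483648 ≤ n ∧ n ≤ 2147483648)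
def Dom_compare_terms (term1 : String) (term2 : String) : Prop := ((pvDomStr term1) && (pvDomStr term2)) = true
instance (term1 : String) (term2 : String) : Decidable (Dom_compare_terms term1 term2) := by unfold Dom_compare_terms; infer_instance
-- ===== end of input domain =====

-- B separates 'find the differing positions' from 'build the masked string' (two passes)
-- instead of A's single fused count-and-accumulate loop; same cost, different decomposition.

-- ===== PORT A =====
def compare_terms (term1 : String) (term2 : String) : Option String :=
  let st := (term1.toList.zip term2.toList).foldl
    (fun (st : Int × List Char) ab =>
      if ab.1 != ab.2 then (st.1 + 1, st.2 ++ ['-']) else (st.1, st.2 ++ [ab.1]))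
    (0, [])
  if st.1 = 1 then some (String.ofList st.2) else none

-- ===== PORT B =====
def compare_terms_alt (term1 : String) (term2 : String) : Option String :=
  let pairs := term1.toList.zip term2.toList
  let diffs := ((PySem.List.enumerate pairs 0).filter (fun x => x.2.1 != x.2.2)).map (·.1)
  match diffs with
  | [idx] =>
      some (String.ofList ((PySem.List.enumerate pairs 0).map
        (fun x => if x.1 == idx then '-' else x.2.1)))
  | _ => none

-- ===== PRECONDITION & SPEC =====
def Spec_compare_terms (term1 : String) (term2 : String) (out : Option String) : Prop := out = compare_terms_alt term1 term2
instance (term1 : String) (term2 : String) (out : Option String) : Decidable (Spec_compare_terms term1 term2 out) := by unfold Spec_compare_terms; infer_instance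

-- ===== CLAIM (what is proved, stated in full; the proofs are below) =====
def Claim_equal_compare_terms : Prop := ∀ (term1 : String) (term2 : String), Dom_compare_terms term1 term2 → Spec_compare_terms term1 term2 (compare_terms term1 term2)

-- ===== LEMMAS AND PROOFS =====

/-- The masked character list both programs produce when they return a string. -/
def pvMask (L : List (Char × Char)) : List Char :=
  L.map (fun ab => if ab.1 != ab.2 then '-' else ab.1)

/-- A's loop: the counter gains the number of differing pairs, the string gains the mask. -/
theorem pvFoldA (L : List (Char × Char)) (c : Int) (r : List Char) :
    L.foldl (fun (st : Int × List Char) ab =>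
        if ab.1 != ab.2 then (st.1 + 1, st.2 ++ ['-']) else (st.1, st.2 ++ [ab.1])) (c, r)
      = (c + ((L.filter (fun ab => ab.1 != ab.2)).length : Int), r ++ pvMask L) := by
  induction L generalizing c r with
  | nil => simp [pvMask]
  | cons ab L ih =>
    rw [List.foldl_cons]
    cases h : ab.1 != ab.2
    · rw [if_neg (by simp_all), ih]
      simp only [List.filter_cons, h, pvMask, List.map_cons, if_neg, Bool.false_eq_true,
        not_false_eq_true, List.append_assoc, List.singleton_append]
    · rw [if_pos (by simp_all), ih]
      simp only [List.filter_cons, h, if_pos, pvMask, List.map_cons, List.length_cons,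
        List.append_assoc, List.singleton_append, Prod.mk.injEq]
      exact ⟨by push_cast; ring, trivial⟩

/-- Filtering the enumerated list on the pair test keeps as many elements as filtering the list. -/
theorem pvLenFilterEnum (L : List (Char × Char)) (s : Int) :
    ((PySem.List.enumerate L s).filter (fun x => x.2.1 != x.2.2)).length
      = (L.filter (fun ab => ab.1 != ab.2)).length := by
  induction L generalizing s with
  | nil => simp [PySem.List.enumerate_nil]
  | cons ab L ih =>
    rw [PySem.List.enumerate_cons, List.filter_cons, List.filter_cons]
    cases h : ab.1 != ab.2
    · simp only [Bool.false_eq_true, if_neg, not_false_eq_true, ih]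
    · simp only [if_pos, List.length_cons, ih]

/-- Every index produced by `enumerate L s` is at least `s`. -/
theorem pvIdxGe (L : List (Char × Char)) (s : Int) (x : Int × (Char × Char))
    (hx : x ∈ PySem.List.enumerate L s) : s ≤ x.1 := by
  rcases (PySem.List.mem_enumerate_iff L s x).1 hx with ⟨k, hk, rfl⟩
  simp

/-- If `idx` is the unique differing position, B's positional mask equals the direct mask. -/
theorem pvMaskEq (L : List (Char × Char)) (s idx : Int)
    (h : ((PySem.List.enumerate L s).filter (fun x => x.2.1 != x.2.2)).map (·.1) = [idx]) :
    (PySem.List.enumerate L s).map (fun x => if x.1 == idx then '-' else x.2.1) = pvMask L := by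
  induction L generalizing s with
  | nil => simp [PySem.List.enumerate_nil] at h
  | cons ab L ih =>
    rw [PySem.List.enumerate_cons] at h ⊢
    rw [List.filter_cons] at h
    cases hd : ab.1 != ab.2
    · rw [hd] at h
      simp only [Bool.false_eq_true, if_neg, not_false_eq_true] at h
      have hidx : s + 1 ≤ idx := by
        have hm : idx ∈ ((PySem.List.enumerate L (s + 1)).filter
            (fun x => x.2.1 != x.2.2)).map (fun x => x.1) := by rw [h]; simp
        rcases List.mem_map.1 hm with ⟨x, hx, rfl⟩
        exact pvIdxGe L (s + 1) x (List.mem_of_mem_filter hx)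
      rw [List.map_cons, ih (s + 1) h]
      simp only [pvMask, List.map_cons, hd, Bool.false_eq_true, if_neg, not_false_eq_true]
      have : (s == idx) = false := by simp; omega
      simp [this]
    · rw [hd] at h
      simp only [if_pos, List.map_cons, List.cons.injEq] at h
      obtain ⟨rfl, hrest⟩ := h
      have hrest' : (PySem.List.enumerate L (s + 1)).filter (fun x => x.2.1 != x.2.2) = [] :=
        List.map_eq_nil_iff.1 hrest
      have hall := List.filter_eq_nil_iff.1 hrest'
      rw [List.map_cons]
      simp only [pvMask, List.map_cons, hd, if_pos, BEq.refl]
      refine congrArg₂ _ rfl ?_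
      have h1 : (PySem.List.enumerate L (s + 1)).map
          (fun x : Int × (Char × Char) => if x.1 == s then '-' else x.2.1)
          = (PySem.List.enumerate L (s + 1)).map
          (fun x : Int × (Char × Char) =>
            ((fun ab : Char × Char => if ab.1 != ab.2 then '-' else ab.1) ∘ (·.2)) x) := by
        apply List.map_congr_left
        intro x hx
        have hge := pvIdxGe L (s + 1) x hx
        have hne : (x.1 == s) = false := by simp; omega
        have hxeq := hall x hx
        simp only [hne, Bool.false_eq_true, if_neg, not_false_eq_true, Function.comp]
        simp at hxeq
        simp [hxeq]
      rw [h1, ← List.map_map, PySem.List.map_snd_enumerate]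

-- ===== VERDICT (by name: the statement is the Claim_ definition above) =====
theorem compare_terms_spec : Claim_equal_compare_terms := by
  intro term1 term2 _
  unfold Spec_compare_terms compare_terms compare_terms_alt
  set L := term1.toList.zip term2.toList with hL
  rw [pvFoldA]
  have hlen := pvLenFilterEnum L 0
  rcases hdiffs : ((PySem.List.enumerate L 0).filter (fun x => x.2.1 != x.2.2)).map (·.1) with
    _ | ⟨idx, _ | ⟨j, rest⟩⟩ <;>
    have hc := congrArg List.length hdiffs <;>
    simp only [List.length_map, hlen, List.length_nil, List.length_cons] at hc
  · simp only [hdiffs, hc]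
    norm_num
  · simp only [hdiffs, hc, pvMaskEq L 0 idx hdiffs]
    norm_num
  · simp only [hdiffs, hc]
    have : ¬ ((0:Int) + ((rest.length + 1 + 1 : Nat) : Int) = 1) := by omega
    simp only [this, if_false]
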